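-- pv_equiv track=rewrite | github.com/lintangisnandar/Kriptografi | Quiz Kriptografi 1/ciphers/playfair.py | generate_playfair_square
-- ===== SOURCE A (Python) =====
-- def generate_playfair_square(key):
--     alphabet = 'abcdefghiklmnopqrstuvwxyz'
--     key = ''.join(sorted(set(key), key=lambda x: key.index(x)))
--     key = key.replace('j', 'i')
--     square = []
--
--     for char in key:
--         if char not in square:
--             square.append(char)
--     for char in alphabet:
--         if char not in square:
--             square.append(char)
--
--     return [square[i:i+5] for i in range(0, len(square), 5)]
-- ===== SOURCE B (Python) =====
-- def generate_playfair_square(key):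
--     alphabet = 'abcdefghiklmnopqrstuvwxyz'
--     mapped = key.replace('j', 'i')
--
--     def rank(c):
--         if c in mapped:
--             return mapped.index(c)
--         return len(mapped) + alphabet.index(c)
--
--     square = sorted(set(mapped) | set(alphabet), key=rank)
--     return [square[i:i+5] for i in range(0, len(square), 5)]
-- ===== Notes on version B (the rewrite author's own statement) =====
-- stated objective: alternative
-- what changed: Instead of A's dedup-sort of the key, j-replacement and two membership-scanned append loops, B assigns every candidate character a numeric rank (first index in the j-mapped key, else key length plus alphabet index) and obtains the square by one sort of the candidate set by that rank.
import Mathlib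
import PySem

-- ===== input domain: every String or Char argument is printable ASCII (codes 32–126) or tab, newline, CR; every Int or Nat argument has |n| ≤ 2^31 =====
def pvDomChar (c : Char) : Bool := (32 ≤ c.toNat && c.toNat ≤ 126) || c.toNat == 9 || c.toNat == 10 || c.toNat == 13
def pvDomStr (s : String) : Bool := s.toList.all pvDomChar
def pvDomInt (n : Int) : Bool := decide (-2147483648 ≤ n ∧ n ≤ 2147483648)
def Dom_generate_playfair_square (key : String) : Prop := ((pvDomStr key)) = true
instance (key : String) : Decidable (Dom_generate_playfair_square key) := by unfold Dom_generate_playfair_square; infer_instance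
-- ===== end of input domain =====

-- B replaces A's dedup/replace/two-membership-loop pipeline by a rank function (first index
-- in the j-mapped key, else key length + alphabet index) and ONE sort of the candidate set
-- by that rank; objective: alternative (sorting instead of scan-and-append).

-- ===== PORT A =====
def generate_playfair_square (key : String) : List (List String) :=
  let alphabet : List Char := "abcdefghiklmnopqrstuvwxyz".toList
  let kl : List Char := key.toList
  -- key = ''.join(sorted(set(key), key=lambda x: key.index(x))): every element of set(key)
  -- occurs in key, so list.index always returns; index? is some there and getD 0 is exact
  let key1 : List Char :=
    PySem.List.sorted (PySem.Set.ofList kl) (fun c => ((PySem.List.index? kl c).getD 0 : Int))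
  -- key = key.replace('j', 'i')
  let key2 : List Char := PySem.Chars.replace key1 ['j'] ['i']
  -- for char in key: if char not in square: square.append(char)
  let square : List String :=
    key2.foldl (fun sq c => if String.ofList [c] ∈ sq then sq else sq ++ [String.ofList [c]]) []
  -- for char in alphabet: if char not in square: square.append(char)
  let square : List String :=
    alphabet.foldl (fun sq c => if String.ofList [c] ∈ sq then sq else sq ++ [String.ofList [c]]) square
  -- [square[i:i+5] for i in range(0, len(square), 5)]
  (PySem.List.pyRange 0 (square.length : Int) 5).map
    (fun i => PySem.List.slice square (some i) (some (i + 5)))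

-- ===== PORT B =====
def generate_playfair_square_alt (key : String) : List (List String) :=
  let alphabet : List Char := "abcdefghiklmnopqrstuvwxyz".toList
  -- mapped = key.replace('j', 'i')
  let mapped : List Char := PySem.Chars.replace key.toList ['j'] ['i']
  -- def rank(c): if c in mapped: return mapped.index(c); return len(mapped) + alphabet.index(c)
  -- (rank is only applied to members of set(mapped)|set(alphabet): both .index calls return,
  --  so index? is some there and getD 0 is exact)
  let rank : Char → Int := fun c =>
    if c ∈ mapped then ((PySem.List.index? mapped c).getD 0 : Int)
    else (mapped.length : Int) + ((PySem.List.index? alphabet c).getD 0 : Int)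
  -- square = sorted(set(mapped) | set(alphabet), key=rank); elements are 1-char strings
  let square : List String :=
    (PySem.List.sorted (PySem.Set.union (PySem.Set.ofList mapped) alphabet) rank).map
      (fun c => String.ofList [c])
  -- [square[i:i+5] for i in range(0, len(square), 5)]
  (PySem.List.pyRange 0 (square.length : Int) 5).map
    (fun i => PySem.List.slice square (some i) (some (i + 5)))

-- ===== PRECONDITION & SPEC =====
def Spec_generate_playfair_square (key : String) (out : List (List String)) : Prop := out = generate_playfair_square_alt key
instance (key : String) (out : List (List String)) : Decidable (Spec_generate_playfair_square key out) := by unfold Spec_generate_playfair_square; infer_instance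

-- ===== CLAIM (what is proved, stated in full; the proofs are below) =====
def Claim_equal_generate_playfair_square : Prop := ∀ (key : String), Dom_generate_playfair_square key → Spec_generate_playfair_square key (generate_playfair_square key)

-- ===== LEMMAS AND PROOFS =====

-- the j→i map, as proofs use it
def pfF (c : Char) : Char := if c = 'j' then 'i' else c

-- Chars.replace with the one-char pattern 'j' is the per-character map pfF
lemma replace_go_ji (cs : List Char) : ∀ (n : Nat) (acc : List Char), cs.length ≤ n →
    PySem.Chars.replace.go ['j'] ['i'] n cs acc = acc.reverse ++ cs.map pfF := by
  induction cs with
  | nil =>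
      intro n acc _
      cases n <;> simp [PySem.Chars.replace.go]
  | cons c cs ih =>
      intro n acc h
      cases n with
      | zero => simp at h
      | succ m =>
          by_cases hc : c = 'j' <;>
            simp [PySem.Chars.replace.go, hc, pfF, Ne.symm, ih m _ (by simpa using h)]

lemma replace_ji (l : List Char) : PySem.Chars.replace l ['j'] ['i'] = l.map pfF := by
  cases l with
  | nil => rfl
  | cons c cs => simpa [PySem.Chars.replace] using replace_go_ji (c :: cs) (cs.length + 1) [] (by simp)

-- ofList of an appended element
lemma ofList_append_singleton' {α : Type} [BEq α] [LawfulBEq α] (l : List α) (x : α) :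
    PySem.Set.ofList (l ++ [x]) =
      (if x ∈ PySem.Set.ofList l then PySem.Set.ofList l else PySem.Set.ofList l ++ [x]) := by
  simp [PySem.Set.ofList_eq_foldl, List.foldl_append, PySem.Set.add]

-- first-occurrence indices strictly increase along ofList
lemma ofList_pairwise_index (l : List Char) :
    (PySem.Set.ofList l).Pairwise
      (fun a b => ((PySem.List.index? l a).getD 0 : Int) < ((PySem.List.index? l b).getD 0 : Int)) := by
  induction l using List.reverseRecOn with
  | nil => simp [PySem.Set.ofList]
  | append_singleton l x ih =>
      rw [ofList_append_singleton']
      by_cases hx : x ∈ PySem.Set.ofList l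
      · rw [if_pos hx]
        refine ih.imp_of_mem ?_
        intro a b ha hb hab
        have ha' : a ∈ l := (PySem.Set.mem_ofList _ _).mp ha
        have hb' : b ∈ l := (PySem.Set.mem_ofList _ _).mp hb
        rwa [PySem.List.index?_append_of_mem _ ha', PySem.List.index?_append_of_mem _ hb']
      · rw [if_neg hx]
        have hx' : x ∉ l := fun h => hx ((PySem.Set.mem_ofList _ _).mpr h)
        rw [List.pairwise_append]
        refine ⟨ih.imp_of_mem ?_, by simp, ?_⟩
        · intro a b ha hb hab
          have ha' : a ∈ l := (PySem.Set.mem_ofList _ _).mp ha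
          have hb' : b ∈ l := (PySem.Set.mem_ofList _ _).mp hb
          rwa [PySem.List.index?_append_of_mem _ ha', PySem.List.index?_append_of_mem _ hb']
        · intro a ha b hb
          have ha' : a ∈ l := (PySem.Set.mem_ofList _ _).mp ha
          have hb' : b = x := by simpa using hb
          subst hb'
          rw [PySem.List.index?_append_of_mem _ ha', PySem.List.index?_append_singleton_self l b hx']
          have hs : (PySem.List.index? l a).isSome := (PySem.List.index?_isSome_iff _ _).mpr ha'
          obtain ⟨k, hk⟩ := Option.isSome_iff_exists.mp hs
          obtain ⟨hlt, -, -⟩ := PySem.List.getElem_of_index?_eq_some hk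
          rw [hk]
          simp only [Option.getD_some]
          exact_mod_cast hlt

-- deduplicating before mapping changes nothing once the result is deduplicated
lemma ofList_map_ofList {α β : Type} [BEq α] [LawfulBEq α] [BEq β] [LawfulBEq β]
    (g : α → β) (xs : List α) :
    PySem.Set.ofList ((PySem.Set.ofList xs).map g) = PySem.Set.ofList (xs.map g) := by
  induction xs using List.reverseRecOn with
  | nil => rfl
  | append_singleton xs x ih =>
      rw [ofList_append_singleton']
      by_cases hx : x ∈ PySem.Set.ofList xs
      · rw [if_pos hx, ih, List.map_append, List.map_singleton, ofList_append_singleton']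
        have : g x ∈ PySem.Set.ofList (xs.map g) := by
          refine (PySem.Set.mem_ofList _ _).mpr ?_
          exact List.mem_map_of_mem ((PySem.Set.mem_ofList _ _).mp hx)
        rw [if_pos this]
      · rw [if_neg hx, List.map_append, List.map_append, List.map_singleton,
          ofList_append_singleton', ofList_append_singleton', ih]

-- dedup of a map over an already-deduplicated prefix followed by a tail
lemma ofList_map_append_ofList {α β : Type} [BEq α] [LawfulBEq α] [BEq β] [LawfulBEq β]
    (g : α → β) (xs ys : List α) :
    List.foldl PySem.Set.add [] (List.map g (PySem.Set.ofList xs ++ ys)) =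
      PySem.Set.ofList (List.map g (xs ++ ys)) := by
  rw [List.map_append, List.map_append, List.foldl_append,
    PySem.Set.ofList_eq_foldl (List.map g xs ++ List.map g ys), List.foldl_append,
    ← PySem.Set.ofList_eq_foldl, ← PySem.Set.ofList_eq_foldl, ofList_map_ofList]

-- the membership-guarded append of A's loops is Set.add of the mapped element
lemma foldl_mk_eq_foldl_add (xs : List Char) (t : List String) :
    xs.foldl (fun sq c => if String.ofList [c] ∈ sq then sq else sq ++ [String.ofList [c]]) t =
      (xs.map (fun c => String.ofList [c])).foldl PySem.Set.add t := by
  rw [List.foldl_map]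
  have hadd : PySem.Set.add = (fun (sq : List String) (y : String) => if y ∈ sq then sq else sq ++ [y]) := by
    funext sq y
    by_cases h : y ∈ sq <;> simp [PySem.Set.add, h]
  rw [hadd]

-- sorted(set(key), key=key.index) is just the first-occurrence dedup of key
lemma sorted_ofList_index (l : List Char) :
    PySem.List.sorted (PySem.Set.ofList l) (fun c => ((PySem.List.index? l c).getD 0 : Int)) =
      PySem.Set.ofList l :=
  PySem.List.sorted_eq_of_perm_of_pairwise_lt _ _ _ (List.Perm.refl _) (ofList_pairwise_index l)

-- first index in an appended list, element not in the prefix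
lemma index?_append_of_not_mem {α : Type} [BEq α] [LawfulBEq α]
    (l t : List α) (v : α) (hv : v ∉ l) :
    PySem.List.index? (l ++ t) v = (PySem.List.index? t v).map (l.length + ·) := by
  induction l with
  | nil => simp [Option.map_id']
  | cons x l ih =>
      have hx : x ≠ v := fun h => hv (by simp [h])
      have hv' : v ∉ l := fun h => hv (by simp [h])
      rw [List.cons_append, PySem.List.index?_cons_of_ne _ hx, ih hv']
      cases PySem.List.index? t v <;> simp [Nat.add_comm, Nat.add_assoc]

-- ofList commutes with an injective map
lemma ofList_map_of_injective {α β : Type} [BEq α] [LawfulBEq α] [BEq β] [LawfulBEq β]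
    (g : α → β) (hg : Function.Injective g) (l : List α) :
    PySem.Set.ofList (l.map g) = (PySem.Set.ofList l).map g := by
  induction l using List.reverseRecOn with
  | nil => rfl
  | append_singleton l x ih =>
      rw [List.map_append, List.map_singleton, ofList_append_singleton', ofList_append_singleton', ih]
      by_cases hx : x ∈ PySem.Set.ofList l
      · rw [if_pos hx, if_pos (List.mem_map_of_mem hx)]
      · rw [if_neg hx, if_neg (fun h => hx (by
            obtain ⟨y, hy, hyx⟩ := List.mem_map.mp h
            exact (hg hyx) ▸ hy)), List.map_append, List.map_singleton]

-- B's rank agrees with the first-occurrence index in mapped ++ alphabet on its members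
lemma rank_eq_index (mapped alphabet : List Char) (c : Char) (hc : c ∈ mapped ++ alphabet) :
    (if c ∈ mapped then ((PySem.List.index? mapped c).getD 0 : Int)
     else (mapped.length : Int) + ((PySem.List.index? alphabet c).getD 0 : Int)) =
      ((PySem.List.index? (mapped ++ alphabet) c).getD 0 : Int) := by
  by_cases hm : c ∈ mapped
  · rw [if_pos hm, PySem.List.index?_append_of_mem _ hm]
  · rw [if_neg hm, index?_append_of_not_mem _ _ _ hm]
    have hca : c ∈ alphabet := by
      rcases List.mem_append.mp hc with h | h
      · exact absurd h hm
      · exact h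
    obtain ⟨k, hk⟩ := Option.isSome_iff_exists.mp ((PySem.List.index?_isSome_iff _ _).mpr hca)
    rw [hk]
    simp

-- B's sort by rank returns exactly the first-occurrence dedup of mapped ++ alphabet
lemma sorted_rank_eq (mapped alphabet : List Char) :
    PySem.List.sorted (PySem.Set.ofList (mapped ++ alphabet))
      (fun c => if c ∈ mapped then ((PySem.List.index? mapped c).getD 0 : Int)
                else (mapped.length : Int) + ((PySem.List.index? alphabet c).getD 0 : Int)) =
      PySem.Set.ofList (mapped ++ alphabet) := by
  refine PySem.List.sorted_eq_of_perm_of_pairwise_lt _ _ _ (List.Perm.refl _) ?_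
  refine (ofList_pairwise_index (mapped ++ alphabet)).imp_of_mem ?_
  intro a b ha hb hab
  have ha' := (PySem.Set.mem_ofList _ _).mp ha
  have hb' := (PySem.Set.mem_ofList _ _).mp hb
  rwa [rank_eq_index mapped alphabet a ha', rank_eq_index mapped alphabet b hb']

-- ===== VERDICT (by name: the statement is the Claim_ definition above) =====
theorem generate_playfair_square_spec : Claim_equal_generate_playfair_square := by
  intro key _
  unfold Spec_generate_playfair_square generate_playfair_square generate_playfair_square_alt
  have hsinj : Function.Injective (fun c : Char => String.ofList [c]) := by
    intro a b h
    simpa using congrArg String.toList h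
  -- A's square = ofList (map singleton (map pfF key ++ alphabet))
  have hA :
      ("abcdefghiklmnopqrstuvwxyz".toList).foldl
          (fun sq c => if String.ofList [c] ∈ sq then sq else sq ++ [String.ofList [c]])
          ((PySem.Chars.replace
              (PySem.List.sorted (PySem.Set.ofList key.toList)
                (fun c => ((PySem.List.index? key.toList c).getD 0 : Int)))
              ['j'] ['i']).foldl
            (fun sq c => if String.ofList [c] ∈ sq then sq else sq ++ [String.ofList [c]]) []) =
        PySem.Set.ofList
          ((key.toList.map pfF ++ "abcdefghiklmnopqrstuvwxyz".toList).map
            (fun c => String.ofList [c])) := by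
    have hmaps : ∀ l : List Char,
        List.map (fun c => String.ofList [c])
            (List.map pfF l ++ "abcdefghiklmnopqrstuvwxyz".toList) =
          List.map ((fun c => String.ofList [c]) ∘ pfF)
            (l ++ "abcdefghiklmnopqrstuvwxyz".toList) := by
      intro l
      rw [List.map_append, List.map_append, List.map_map]
      congr 1

    rw [sorted_ofList_index, replace_ji, foldl_mk_eq_foldl_add, foldl_mk_eq_foldl_add,
      ← List.foldl_append, ← List.map_append, hmaps, ofList_map_append_ofList, ← hmaps]
  -- B's square = the same list
  have hB :
      (PySem.List.sorted
          (PySem.Set.union (PySem.Set.ofList (PySem.Chars.replace key.toList ['j'] ['i']))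
            "abcdefghiklmnopqrstuvwxyz".toList)
          (fun c =>
            if c ∈ PySem.Chars.replace key.toList ['j'] ['i'] then
              ((PySem.List.index? (PySem.Chars.replace key.toList ['j'] ['i']) c).getD 0 : Int)
            else ((PySem.Chars.replace key.toList ['j'] ['i']).length : Int) +
              ((PySem.List.index? "abcdefghiklmnopqrstuvwxyz".toList c).getD 0 : Int))).map
        (fun c => String.ofList [c]) =
        PySem.Set.ofList
          ((key.toList.map pfF ++ "abcdefghiklmnopqrstuvwxyz".toList).map
            (fun c => String.ofList [c])) := by
    have hu : PySem.Set.union (PySem.Set.ofList (PySem.Chars.replace key.toList ['j'] ['i']))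
        "abcdefghiklmnopqrstuvwxyz".toList =
        PySem.Set.ofList (PySem.Chars.replace key.toList ['j'] ['i'] ++
          "abcdefghiklmnopqrstuvwxyz".toList) := by
      rw [PySem.Set.ofList_append]
      rfl
    rw [hu, replace_ji,
      sorted_rank_eq (key.toList.map pfF) ("abcdefghiklmnopqrstuvwxyz".toList),
      ← ofList_map_of_injective _ hsinj]
  simp only [hA, hB]
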